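-- pv_equiv track=rewrite | github.com/Adamp799/advent2025 | day07/part1/bgorithm.py | tachyon_beam
-- ===== SOURCE A (Python) =====
-- def tachyon_beam(input_data):
--     total_splits = 0
--     beam_locations = set()
--     beam_locations.add(input_data[0].index('S'))
--     for line in input_data[1:]:
--         splitters = {i for i, char in enumerate(line) if char == '^'}
--         intersections = beam_locations.intersection(splitters)
--         total_splits += len(intersections)
--         beam_locations.update({y for x in intersections for y in (x - 1, x + 1) if 0 <= y <= len(line) - 1})
--     return total_splits
-- ===== SOURCE B (Python) =====
-- def tachyon_beam(input_data):
--     def run(lines, beams):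
--         if not lines:
--             return 0
--         line = lines[0]
--         count = 0
--         spread = set(beams)
--         for x in beams:
--             if 0 <= x < len(line) and line[x] == '^':
--                 count += 1
--                 if x - 1 >= 0:
--                     spread.add(x - 1)
--                 if x + 1 < len(line):
--                     spread.add(x + 1)
--         return count + run(lines[1:], spread)
--     return run(input_data[1:], {input_data[0].index('S')})
-- ===== Notes on version B (the rewrite author's own statement) =====
-- stated objective: alternative
-- what changed: B recurses over the lines and, per line, probes the grid at each active beam column with bounds checks, growing the spread set element by element, instead of A's per-line scan that builds a splitter set and intersects it with the beam set.
import Mathlib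
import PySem

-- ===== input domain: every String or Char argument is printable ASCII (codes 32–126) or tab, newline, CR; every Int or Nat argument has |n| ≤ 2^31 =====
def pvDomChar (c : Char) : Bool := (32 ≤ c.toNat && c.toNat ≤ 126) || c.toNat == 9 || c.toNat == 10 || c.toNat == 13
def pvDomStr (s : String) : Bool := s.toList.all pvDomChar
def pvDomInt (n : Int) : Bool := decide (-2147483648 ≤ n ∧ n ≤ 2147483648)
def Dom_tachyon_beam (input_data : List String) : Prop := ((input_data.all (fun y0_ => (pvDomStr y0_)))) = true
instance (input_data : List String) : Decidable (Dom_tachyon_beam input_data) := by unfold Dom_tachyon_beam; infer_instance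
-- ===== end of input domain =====

-- B recurses over the lines and probes the grid per active beam column, growing the spread
-- set element by element, instead of A's splitter-set-and-intersection scan per line;
-- objective: alternative (different per-line algorithm and decomposition, same result).

-- ===== PORT A =====
-- loop body of A: build the splitter set, intersect, count, spread
def tachyonStepA (st : Int × PySem.Set Int) (line : String) : Int × PySem.Set Int :=
  let chars := line.toList
  let splitters : PySem.Set Int :=
    PySem.Set.ofList (((PySem.List.enumerate chars).filter (fun p => p.2 == '^')).map (fun p => p.1))
  let inter := PySem.Set.inter st.2 splitters
  let total := st.1 + PySem.Set.len inter
  let spread : PySem.Set Int := PySem.Set.ofList (inter.flatMap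
    (fun x => ([x - 1, x + 1].filter (fun y => decide (0 ≤ y) && decide (y ≤ (chars.length : Int) - 1)))))
  (total, PySem.Set.update st.2 spread)

def tachyon_beam (input_data : List String) : Int :=
  match input_data with
  | [] => 0   -- unreachable under Pre_ (input_data[0] would raise IndexError)
  | line0 :: rest =>
    let beams0 : PySem.Set Int := PySem.Set.add PySem.Set.empty (PySem.Str.find line0 "S")
    (rest.foldl tachyonStepA (0, beams0)).1

-- ===== PORT B =====
-- body of B's inner for-loop: bounds-checked probe of one beam column, conditional spreads
def tachyonProbe (chars : List Char) (st : Int × PySem.Set Int) (x : Int) : Int × PySem.Set Int :=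
  if (decide (0 ≤ x) && decide (x < (chars.length : Int)) && (chars.getD x.toNat ' ' == '^')) = true then
    let s1 := if 0 ≤ x - 1 then PySem.Set.add st.2 (x - 1) else st.2
    let s2 := if x + 1 < (chars.length : Int) then PySem.Set.add s1 (x + 1) else s1
    (st.1 + 1, s2)
  else st

-- B's recursive helper 'run': count this line's hits, recurse on the rest with the spread set
def tachyonRun : List String → PySem.Set Int → Int
  | [], _ => 0
  | line :: rest, beams =>
    let chars := line.toList
    let res := beams.foldl (tachyonProbe chars) (0, beams)
    res.1 + tachyonRun rest res.2

def tachyon_beam_alt (input_data : List String) : Int :=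
  match input_data with
  | [] => 0   -- unreachable under Pre_
  | line0 :: rest =>
    tachyonRun rest (PySem.Set.add PySem.Set.empty (PySem.Str.find line0 "S"))

-- ===== PRECONDITION & SPEC =====
-- Pre_ excludes exactly the inputs where A raises: the empty list (input_data[0] is an
-- IndexError) and inputs whose first line has no 'S' (str.index raises ValueError).
def Pre_tachyon_beam (input_data : List String) : Prop :=
  input_data ≠ [] ∧ PySem.Str.isIn "S" (input_data.headD "") = true
instance (input_data : List String) : Decidable (Pre_tachyon_beam input_data) := by
  unfold Pre_tachyon_beam; infer_instance
def pvWitness_tachyon_beam : List String := ["..S..", "..^..", ".^.^.", "^...^"]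
def Spec_tachyon_beam (input_data : List String) (out : Int) : Prop := out = tachyon_beam_alt input_data
instance (input_data : List String) (out : Int) : Decidable (Spec_tachyon_beam input_data out) := by
  unfold Spec_tachyon_beam; infer_instance

-- ===== CLAIM (what is proved, stated in full; the proofs are below) =====
def Claim_equal_tachyon_beam : Prop := ∀ (input_data : List String), Dom_tachyon_beam input_data → Pre_tachyon_beam input_data → Spec_tachyon_beam input_data (tachyon_beam input_data)

-- ===== LEMMAS AND PROOFS =====

-- B's probe condition, as a predicate
def pvHit (chars : List Char) (x : Int) : Bool :=
  decide (0 ≤ x) && decide (x < (chars.length : Int)) && (chars.getD x.toNat ' ' == '^')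

-- A's spread guard, as a list of candidate columns per hit
def pvSpreadOf (chars : List Char) (x : Int) : List Int :=
  [x - 1, x + 1].filter (fun y => decide (0 ≤ y) && decide (y ≤ (chars.length : Int) - 1))

-- splitter-set membership test = direct bounds-checked grid probe
lemma pv_contains_splitters (chars : List Char) (x : Int) :
    PySem.Set.contains
      (PySem.Set.ofList (((PySem.List.enumerate chars).filter (fun p => p.2 == '^')).map (fun p => p.1))) x
    = pvHit chars x := by
  rw [Bool.eq_iff_iff]
  simp only [pvHit, PySem.Set.contains_iff, PySem.Set.mem_ofList, List.mem_map, List.mem_filter,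
    PySem.List.mem_enumerate_iff, Bool.and_eq_true, decide_eq_true_eq, beq_iff_eq]
  constructor
  · rintro ⟨p, ⟨⟨k, hk, rfl⟩, hc⟩, rfl⟩
    refine ⟨⟨by simp, by simp; exact_mod_cast hk⟩, ?_⟩
    simp only [zero_add, Int.toNat_natCast]
    simpa [List.getD_eq_getElem?_getD, List.getElem?_eq_getElem hk] using hc
  · rintro ⟨⟨h0, hn⟩, hc⟩
    have hk : x.toNat < chars.length := by omega
    refine ⟨(x, chars[x.toNat]), ⟨⟨x.toNat, hk, by simp [Prod.ext_iff]; omega⟩, ?_⟩, rfl⟩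
    simpa [List.getD_eq_getElem?_getD, List.getElem?_eq_getElem hk] using hc

-- updating with the deduplicated list adds the same elements in the same order
lemma pv_update_ofList {α : Type} [BEq α] [LawfulBEq α] (s : PySem.Set α) (xs : List α) :
    PySem.Set.update s (PySem.Set.ofList xs) = PySem.Set.update s xs := by
  induction xs using List.reverseRecOn generalizing s with
  | nil => rfl
  | append_singleton xs x ih =>
    rw [PySem.Set.ofList_append_singleton]
    by_cases hx : x ∈ PySem.Set.ofList xs
    · rw [PySem.Set.add_of_mem hx, ih, PySem.Set.update_append,
        PySem.Set.update_cons, PySem.Set.update_nil, PySem.Set.add_of_mem]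
      exact (PySem.Set.mem_update _ _ _).2 (Or.inr ((PySem.Set.mem_ofList _ _).1 hx))
    · rw [PySem.Set.add_of_not_mem hx, PySem.Set.update_append, PySem.Set.update_append, ih]

-- tachyonRun unfolded on a cons (definitional)
lemma tachyonRun_cons (line : String) (rest : List String) (beams : PySem.Set Int) :
    tachyonRun (line :: rest) beams
      = (beams.foldl (tachyonProbe line.toList) (0, beams)).1
        + tachyonRun rest (beams.foldl (tachyonProbe line.toList) (0, beams)).2 := rfl

-- B's fold over the beam list = A's count-and-update on the same list
lemma pv_foldl_probe (chars : List Char) (xs : List Int) (t : Int) (s : PySem.Set Int) :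
    xs.foldl (tachyonProbe chars) (t, s)
      = (t + ((xs.filter (pvHit chars)).length : Int),
         PySem.Set.update s ((xs.filter (pvHit chars)).flatMap (pvSpreadOf chars))) := by
  induction xs generalizing t s with
  | nil => simp [PySem.Set.update_nil]
  | cons x xs ih =>
    by_cases hx : pvHit chars x = true
    · have hx0 : (0 : Int) ≤ x := by
        have := hx; simp only [pvHit, Bool.and_eq_true, decide_eq_true_eq] at this; exact this.1.1
      have hxn : x < (chars.length : Int) := by
        have := hx; simp only [pvHit, Bool.and_eq_true, decide_eq_true_eq] at this; exact this.1.2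
      have hstep : tachyonProbe chars (t, s) x
          = (t + 1, PySem.Set.update s (pvSpreadOf chars x)) := by
        have e1 : (decide ((0:Int) ≤ x - 1) && decide (x - 1 ≤ (chars.length : Int) - 1))
            = decide ((0:Int) ≤ x - 1) := by
          have h : x - 1 ≤ (chars.length : Int) - 1 := by omega
          simp [h]
        have e2 : (decide ((0:Int) ≤ x + 1) && decide (x + 1 ≤ (chars.length : Int) - 1))
            = decide (x + 1 < (chars.length : Int)) := by
          have h : (0:Int) ≤ x + 1 := by omega
          simp only [h, decide_true, Bool.true_and, decide_eq_decide]
          omega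
        have hlist : pvSpreadOf chars x
            = (if (0:Int) ≤ x - 1 then [x - 1] else [])
              ++ (if x + 1 < (chars.length : Int) then [x + 1] else []) := by
          unfold pvSpreadOf
          rw [List.filter_cons, List.filter_cons, List.filter_nil, e1, e2]
          by_cases h1 : (1:Int) ≤ x <;> by_cases h2 : x + 1 < (chars.length : Int) <;>
            simp [h1, h2]
        unfold tachyonProbe
        rw [if_pos (by simpa [pvHit] using hx)]
        simp only []
        congr 1
        rw [hlist, PySem.Set.update_append]
        by_cases h1 : (1:Int) ≤ x <;> by_cases h2 : x + 1 < (chars.length : Int) <;>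
          simp [h1, h2, PySem.Set.update_cons, PySem.Set.update_nil]
      rw [List.foldl_cons, hstep, ih, List.filter_cons_of_pos hx, List.flatMap_cons,
        PySem.Set.update_append]
      simp only [Prod.mk.injEq, List.length_cons]
      exact ⟨by push_cast; ring, trivial⟩
    · have hstep : tachyonProbe chars (t, s) x = (t, s) := by
        unfold tachyonProbe; rw [if_neg (by simpa [pvHit] using hx)]
      rw [List.foldl_cons, hstep, ih, List.filter_cons_of_neg (by simpa using hx)]

-- A's loop body, rewritten through B's hit predicate and guarded spread
lemma pv_stepA_eq (t : Int) (s : PySem.Set Int) (line : String) :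
    tachyonStepA (t, s) line
      = (t + ((s.filter (pvHit line.toList)).length : Int),
         PySem.Set.update s ((s.filter (pvHit line.toList)).flatMap (pvSpreadOf line.toList))) := by
  unfold tachyonStepA
  have hinter : PySem.Set.inter s
      (PySem.Set.ofList (((PySem.List.enumerate line.toList).filter (fun p => p.2 == '^')).map (fun p => p.1)))
      = s.filter (pvHit line.toList) := by
    show s.filter _ = _
    exact List.filter_congr (fun x _ => pv_contains_splitters line.toList x)
  simp only [hinter, pv_update_ofList]
  rfl

-- A's fold with accumulated total = running total + B's recursion
lemma pv_fold_eq_run (rest : List String) (t : Int) (s : PySem.Set Int) :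
    (rest.foldl tachyonStepA (t, s)).1 = t + tachyonRun rest s := by
  induction rest generalizing t s with
  | nil => simp [tachyonRun]
  | cons line rest ih =>
    rw [List.foldl_cons, pv_stepA_eq, ih, tachyonRun_cons]
    simp only [pv_foldl_probe]
    ring

-- ===== VERDICT (by name: the statement is the Claim_ definition above) =====
theorem tachyon_beam_spec : Claim_equal_tachyon_beam := by
  intro input_data _ _
  unfold Spec_tachyon_beam tachyon_beam tachyon_beam_alt
  cases input_data with
  | nil => rfl
  | cons line0 rest => simpa using pv_fold_eq_run rest 0 _
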